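-- pv_equiv track=rewrite | github.com/differentname123/a_auto_trade | StrategyExecutor/zuhe_daily_strategy.py | filter_combination_list
-- ===== SOURCE A (Python) =====
-- def filter_combination_list(combination_list, statistics, zero_combinations_set, trade_count_threshold=10000):
--     """
--     过滤掉交易次数小于10000的组合,不过滤已存在
--     :param combination_list:
--     :param statistics:
--     :param trade_count_threshold:
--     :return:
--     """
--     zero_combinations_set = {frozenset(zero_combination.split(':')) for zero_combination in zero_combinations_set}
--     result_combination_list = []
--     for combination in combination_list:
--         combination_key = ':'.join(combination)
--         combination_set = set(combination)
--         if combination_key not in statistics or statistics[combination_key]['trade_count'] >= trade_count_threshold: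
--             if not any(combination_set >= zero_comb for zero_comb in zero_combinations_set):
--                 result_combination_list.append(combination)
--     return result_combination_list
-- ===== SOURCE B (Python) =====
-- def filter_combination_list(combination_list, statistics, zero_combinations_set, trade_count_threshold=10000):
--     # inverted index: element -> indices of the zero-combination sets containing it;
--     # a zero set is a subset of a combination iff its hit-counter reaches its size
--     zsets = [frozenset(z.split(':')) for z in zero_combinations_set]
--     sizes = [len(fs) for fs in zsets]
--     pairs = [(e, j) for j, fs in enumerate(zsets) for e in fs]
--     index = {}
--     for e, j in pairs:
--         index.setdefault(e, []).append(j)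
--     result = []
--     for combination in combination_list:
--         entry = statistics.get(':'.join(combination))
--         if entry is not None and entry['trade_count'] < trade_count_threshold:
--             continue
--         hits = [j for e in set(combination) for j in index.get(e, [])]
--         counts = {}
--         for j in hits:
--             counts[j] = counts.get(j, 0) + 1
--         if any(c == sizes[j] for j, c in counts.items()):
--             continue
--         result.append(combination)
--     return result
-- ===== Notes on version B (the rewrite author's own statement) =====
-- stated objective: alternative
-- what changed: B replaces A's per-combination scan over all zero-combination sets by a precomputed inverted index (element -> indices of zero sets containing it) with per-combination hit counters: a zero set is a subset iff its counter reaches its size; low-trade combinations are skipped via statistics.get.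
import Mathlib
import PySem

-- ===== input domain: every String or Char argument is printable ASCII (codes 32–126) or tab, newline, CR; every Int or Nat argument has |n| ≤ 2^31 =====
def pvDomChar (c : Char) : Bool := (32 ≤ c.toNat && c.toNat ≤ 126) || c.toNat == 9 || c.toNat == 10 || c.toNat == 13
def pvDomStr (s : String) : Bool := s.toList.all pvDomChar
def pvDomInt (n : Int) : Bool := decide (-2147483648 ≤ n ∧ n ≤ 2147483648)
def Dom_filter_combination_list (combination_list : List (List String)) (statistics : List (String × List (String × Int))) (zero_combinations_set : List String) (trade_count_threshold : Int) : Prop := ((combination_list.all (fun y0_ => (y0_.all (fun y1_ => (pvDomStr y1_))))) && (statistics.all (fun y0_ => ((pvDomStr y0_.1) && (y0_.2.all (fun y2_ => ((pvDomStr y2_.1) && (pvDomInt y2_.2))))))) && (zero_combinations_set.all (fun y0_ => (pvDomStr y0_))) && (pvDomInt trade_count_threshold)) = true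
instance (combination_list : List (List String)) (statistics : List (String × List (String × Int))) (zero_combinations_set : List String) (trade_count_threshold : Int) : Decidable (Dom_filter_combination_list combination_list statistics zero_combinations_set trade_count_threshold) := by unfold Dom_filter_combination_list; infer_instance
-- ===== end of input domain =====

-- ===== PORT A =====
-- B replaces A's per-combination scan over all zero combinations by an inverted index
-- (element -> indices of the zero sets containing it) with hit counters: a zero set is a
-- subset of a combination iff its counter reaches its size. Equivalence is about the return
-- value only.

-- z.split(':'): the separator ":" is nonempty, so Python's split never raises and split? is
-- always `some`; the `getD []` default is unreachable (exact).
def pvSplit (z : String) : List String := (PySem.Str.split? z ":").getD []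

-- Python's set comprehension over frozensets in A, ported by hand: a list of PySem.Sets
-- deduplicated by set equality in first-insertion order; it is only consumed by `any`, so
-- order/dedup are immaterial.
def pvZSets (zero_combinations_set : List String) : List (PySem.Set String) :=
  zero_combinations_set.foldl (fun acc z =>
    let s : PySem.Set String := PySem.Set.ofList (pvSplit z)
    if acc.any (fun t => PySem.Set.equal t s) then acc else acc ++ [s]) []

def filter_combination_list (combination_list : List (List String)) (statistics : List (String × List (String × Int))) (zero_combinations_set : List String) (trade_count_threshold : Int) : List (List String) :=
  let zsets := pvZSets zero_combinations_set
  combination_list.foldl (fun res combination =>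
    let combination_key := PySem.Str.join ":" combination
    let combination_set : PySem.Set String := PySem.Set.ofList combination
    let cond1 : Bool :=
      match PySem.Dict.get? (PySem.Dict.mk statistics) combination_key with
      | none => true           -- combination_key not in statistics
      | some d =>              -- statistics[combination_key]['trade_count'] >= threshold
        -- getD default 0 is reached only outside Pre_ (Python raises KeyError there)
        decide (PySem.Dict.getD (PySem.Dict.mk d) "trade_count" 0 ≥ trade_count_threshold)
    if cond1 && !(zsets.any (fun z => PySem.Set.issuperset combination_set z)) then
      res ++ [combination]
    else res) []

-- ===== PORT B =====
def filter_combination_list_alt (combination_list : List (List String)) (statistics : List (String × List (String × Int))) (zero_combinations_set : List String) (trade_count_threshold : Int) : List (List String) :=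
  let zsets : List (PySem.Set String) :=
    zero_combinations_set.map (fun z => PySem.Set.ofList (pvSplit z))
  let sizes : List Int := zsets.map (fun fs => (fs.length : Int))
  -- [(e, j) for j, fs in enumerate(zsets) for e in fs]
  let pairs : List (String × Int) :=
    (PySem.List.enumerate zsets).flatMap (fun p => p.2.map (fun e => (e, p.1)))
  -- index.setdefault(e, []).append(j)  =  index[e] = index.get(e, []) + [j]
  let index : PySem.Dict String (List Int) :=
    pairs.foldl (fun d p => PySem.Dict.modify d p.1 [] (fun l => l ++ [p.2])) PySem.Dict.empty
  combination_list.foldl (fun res combination =>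
    let skip : Bool :=  -- entry is not None and entry['trade_count'] < threshold
      match PySem.Dict.get? (PySem.Dict.mk statistics) (PySem.Str.join ":" combination) with
      | some d => decide (PySem.Dict.getD (PySem.Dict.mk d) "trade_count" 0 < trade_count_threshold)
      | none => false
    if skip then res
    else
      -- hits = [j for e in set(combination) for j in index.get(e, [])]
      let hits : List Int :=
        (PySem.Set.ofList combination).flatMap (fun e => PySem.Dict.getD index e [])
      -- counts[j] = counts.get(j, 0) + 1
      let counts : PySem.Dict Int Int :=
        hits.foldl (fun d j => PySem.Dict.modify d j 0 (· + 1)) PySem.Dict.empty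
      -- any(c == sizes[j] for j, c in counts.items()); every key j of counts is a valid
      -- index into sizes, so Python's sizes[j] never raises and pyGet? is always `some`
      if counts.items.any (fun p => PySem.List.pyGet? sizes p.1 == some p.2) then res
      else res ++ [combination]) []

-- ===== PRECONDITION & SPEC =====
-- Pre_ excludes exactly the inputs on which Python A raises KeyError: some combination whose
-- ':'-join is a key of statistics whose entry lacks the 'trade_count' key.
def Pre_filter_combination_list (combination_list : List (List String)) (statistics : List (String × List (String × Int))) (zero_combinations_set : List String) (trade_count_threshold : Int) : Prop :=
  (combination_list.all (fun combination =>
    match PySem.Dict.get? (PySem.Dict.mk statistics) (PySem.Str.join ":" combination) with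
    | some d => PySem.Dict.contains (PySem.Dict.mk d) "trade_count"
    | none => true)) = true
instance (combination_list : List (List String)) (statistics : List (String × List (String × Int))) (zero_combinations_set : List String) (trade_count_threshold : Int) : Decidable (Pre_filter_combination_list combination_list statistics zero_combinations_set trade_count_threshold) := by unfold Pre_filter_combination_list; infer_instance

def pvWitness_filter_combination_list : List (List String) × (List (String × List (String × Int))) × List String × Int :=
  ([["a"], ["b", "c"]], [("a", [("trade_count", 5)])], ["b:c", "d"], 3)

def Spec_filter_combination_list (combination_list : List (List String)) (statistics : List (String × List (String × Int))) (zero_combinations_set : List String) (trade_count_threshold : Int) (out : List (List String)) : Prop := out = filter_combination_list_alt combination_list statistics zero_combinations_set trade_count_threshold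
instance (combination_list : List (List String)) (statistics : List (String × List (String × Int))) (zero_combinations_set : List String) (trade_count_threshold : Int) (out : List (List String)) : Decidable (Spec_filter_combination_list combination_list statistics zero_combinations_set trade_count_threshold out) := by unfold Spec_filter_combination_list; infer_instance

-- ===== CLAIM (what is proved, stated in full; the proofs are below) =====
def Claim_equal_filter_combination_list : Prop := ∀ (combination_list : List (List String)) (statistics : List (String × List (String × Int))) (zero_combinations_set : List String) (trade_count_threshold : Int), Dom_filter_combination_list combination_list statistics zero_combinations_set trade_count_threshold → Pre_filter_combination_list combination_list statistics zero_combinations_set trade_count_threshold → Spec_filter_combination_list combination_list statistics zero_combinations_set trade_count_threshold (filter_combination_list combination_list statistics zero_combinations_set trade_count_threshold)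

-- ===== LEMMAS AND PROOFS =====

-- Python's split never yields the empty list of pieces
lemma splitOn_go_ne_nil (sep : List Char) : ∀ (fuel : Nat) (l cur : List Char) (acc : List (List Char)),
    PySem.Chars.splitOn.go sep fuel l cur acc ≠ [] := by
  intro fuel
  induction fuel with
  | zero => intro l cur acc; simp [PySem.Chars.splitOn.go]
  | succ n ih =>
    intro l cur acc
    cases l with
    | nil => simp [PySem.Chars.splitOn.go]
    | cons c rest =>
      rw [PySem.Chars.splitOn.go]
      by_cases h : sep.isPrefixOf (c :: rest) = true
      · rw [if_pos h]; exact ih _ _ _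
      · rw [if_neg h]; exact ih _ _ _

lemma pvSplit_ne_nil (z : String) : pvSplit z ≠ [] := by
  unfold pvSplit PySem.Str.split? PySem.Chars.split?
  have hsep : ((":" : String).toList).isEmpty = false := rfl
  rw [hsep]
  simp only [Bool.false_eq_true, if_false, Option.map_some, Option.getD_some, ne_eq,
    List.map_eq_nil_iff]
  unfold PySem.Chars.splitOn
  exact splitOn_go_ne_nil _ _ _ _ _

lemma ofList_ne_nil {xs : List String} (h : xs ≠ []) : PySem.Set.ofList xs ≠ [] := by
  cases xs with
  | nil => exact absurd rfl h
  | cons x t =>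
    intro hc
    have : x ∈ PySem.Set.ofList (x :: t) := (PySem.Set.mem_ofList _ _).mpr List.mem_cons_self
    rw [hc] at this
    exact List.not_mem_nil this

-- the flat (element, zero-index) pair list, starting at tag s (proof-side view of B's `pairs`)
def pvPairs (Z : List (PySem.Set String)) (s : Int) : List (String × Int) :=
  (PySem.List.enumerate Z s).flatMap (fun p => p.2.map (fun e => (e, p.1)))

lemma pvPairs_cons (fs : PySem.Set String) (Z : List (PySem.Set String)) (s : Int) :
    pvPairs (fs :: Z) s = fs.map (fun e => (e, s)) ++ pvPairs Z (s + 1) := by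
  simp [pvPairs, PySem.List.enumerate_cons]

lemma mem_pvPairs (Z : List (PySem.Set String)) (s : Int) (e : String) (j : Int) :
    (e, j) ∈ pvPairs Z s ↔ ∃ k : Nat, ∃ _ : k < Z.length, j = s + (k : Int) ∧ e ∈ Z[k] := by
  simp only [pvPairs, List.mem_flatMap]
  constructor
  · rintro ⟨p, hp, hm⟩
    rw [PySem.List.mem_enumerate_iff] at hp
    obtain ⟨k, hk, rfl⟩ := hp
    simp only [List.mem_map, Prod.mk.injEq] at hm
    obtain ⟨e', he', rfl, rfl⟩ := hm
    exact ⟨k, hk, rfl, he'⟩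
  · rintro ⟨k, hk, rfl, he⟩
    exact ⟨(s + (k : Int), Z[k]), (PySem.List.mem_enumerate_iff _ _ _).mpr ⟨k, hk, rfl⟩,
      List.mem_map.mpr ⟨e, he, rfl⟩⟩

lemma count_pvPairs_lt (Z : List (PySem.Set String)) :
    ∀ (s : Int) (e : String) (j : Int), j < s → (pvPairs Z s).count (e, j) = 0 := by
  induction Z with
  | nil => intro s e j _; simp [pvPairs]
  | cons fs t ih =>
    intro s e j hj
    rw [pvPairs_cons, List.count_append, ih (s + 1) e j (by omega)]
    have hb : (fs.map (fun e => (e, s))).count (e, j) = 0 := by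
      rw [List.count_eq_zero]
      intro hm
      simp only [List.mem_map, Prod.mk.injEq] at hm
      obtain ⟨e', _, _, rfl⟩ := hm
      omega
    omega

lemma count_pvPairs_le_one (Z : List (PySem.Set String)) (hnd : ∀ fs ∈ Z, List.Nodup fs) :
    ∀ (s : Int) (e : String) (j : Int), (pvPairs Z s).count (e, j) ≤ 1 := by
  induction Z with
  | nil => intro s e j; simp [pvPairs]
  | cons fs t ih =>
    intro s e j
    have hndt : ∀ fs' ∈ t, List.Nodup fs' := fun fs' h => hnd fs' (List.mem_cons_of_mem _ h)
    rw [pvPairs_cons, List.count_append]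
    by_cases hj : j = s
    · subst hj
      have hrest : (pvPairs t (j + 1)).count (e, j) = 0 := count_pvPairs_lt t (j + 1) e j (by omega)
      have hinj : Function.Injective (fun e : String => (e, j)) := by
        intro a b hab; simpa using hab
      have hblock : (fs.map (fun e => (e, j))).count (e, j) ≤ 1 := by
        rw [List.count_map_of_injective fs _ hinj]
        exact List.nodup_iff_count_le_one.mp (hnd fs List.mem_cons_self) e
      omega
    · have hblock : (fs.map (fun e => (e, s))).count (e, j) = 0 := by
        rw [List.count_eq_zero]
        intro hm
        simp only [List.mem_map, Prod.mk.injEq] at hm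
        obtain ⟨e', _, _, h⟩ := hm
        exact hj h.symm
      have := ih hndt (s + 1) e j
      omega

-- the built index looked up at e is exactly the pair list filtered at e
lemma getD_pvIndex (pairs : List (String × Int)) (e : String) :
    (pairs.foldl (fun d p => PySem.Dict.modify d p.1 [] (fun l => l ++ [p.2]))
        PySem.Dict.empty).getD e []
      = (pairs.filter (fun p => p.1 == e)).map (fun p => p.2) := by
  rw [PySem.Dict.getD_foldl_modify_append]
  simp

lemma mem_filter_map_pairs (pairs : List (String × Int)) (e : String) (j : Int) :
    j ∈ (pairs.filter (fun p => p.1 == e)).map (fun p => p.2) ↔ (e, j) ∈ pairs := by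
  simp only [List.mem_map, List.mem_filter, beq_iff_eq]
  constructor
  · rintro ⟨p, ⟨hp, rfl⟩, rfl⟩
    exact hp
  · intro h
    exact ⟨(e, j), ⟨h, rfl⟩, rfl⟩

-- count of j in the filtered-and-projected pair list
lemma count_map_filter_pairs (l : List (String × Int)) (e : String) (j : Int) :
    ((l.filter (fun p => p.1 == e)).map (fun p => p.2)).count j = l.count (e, j) := by
  induction l with
  | nil => simp
  | cons p t ih =>
    by_cases h1 : p.1 = e
    · by_cases h2 : p.2 = j
      · have hp : p = (e, j) := by cases p; simp_all
        subst hp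
        simp [ih]
      · have hne : p ≠ (e, j) := by intro hc; subst hc; exact h2 rfl
        simp [h1, h2, hne, ih]
    · have hne : p ≠ (e, j) := by intro hc; subst hc; exact h1 rfl
      simp [h1, hne, ih]

-- count of j in the hit list = number of elements of cs that index j
lemma count_hits (pairs : List (String × Int)) (hle : ∀ e j, pairs.count (e, j) ≤ 1) :
    ∀ (cs : List String) (j : Int),
    ((cs.flatMap (fun e => (pairs.filter (fun p => p.1 == e)).map (fun p => p.2))).count j)
      = cs.countP (fun e => decide ((e, j) ∈ pairs)) := by
  intro cs
  induction cs with
  | nil => intro j; simp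
  | cons e t ih =>
    intro j
    rw [List.flatMap_cons, List.count_append, count_map_filter_pairs, List.countP_cons, ih j]
    by_cases h : (e, j) ∈ pairs
    · have h1 := List.count_pos_iff.mpr h
      have h2 := hle e j
      simp only [h, decide_true, if_true]
      omega
    · rw [List.count_eq_zero.mpr h]
      simp only [h, decide_false, Bool.false_eq_true, if_false]
      omega

-- counting criterion for the subset test
lemma countP_mem_eq_length_iff (cs z : List String) (hcs : cs.Nodup) (hz : z.Nodup) :
    (cs.countP (fun e => decide (e ∈ z)) = z.length ↔ ∀ x ∈ z, x ∈ cs) := by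
  have hperm : (cs.filter (fun e => decide (e ∈ z))).Perm (z.filter (fun x => decide (x ∈ cs))) := by
    rw [List.perm_ext_iff_of_nodup (hcs.filter _) (hz.filter _)]
    intro a
    simp only [List.mem_filter, decide_eq_true_eq]
    tauto
  rw [List.countP_eq_length_filter, hperm.length_eq, ← List.countP_eq_length_filter]
  rw [List.countP_eq_length]
  constructor
  · intro h x hx
    simpa using h x hx
  · intro h a ha
    simpa using h a ha

-- per-combination core: B's counter test equals A's superset scan
lemma banned_eq (Z : List (PySem.Set String)) (hnd : ∀ fs ∈ Z, List.Nodup fs)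
    (hne : ∀ fs ∈ Z, fs ≠ []) (cs : List String) (hcs : cs.Nodup) :
    (((cs.flatMap (fun e => PySem.Dict.getD
          ((pvPairs Z 0).foldl (fun d p => PySem.Dict.modify d p.1 [] (fun l => l ++ [p.2]))
            PySem.Dict.empty) e [])).foldl
        (fun d j => PySem.Dict.modify d j 0 (· + 1)) PySem.Dict.empty).items.any
        (fun p => PySem.List.pyGet? (Z.map (fun fs => ((fs.length : Nat) : Int))) p.1 == some p.2))
      = Z.any (fun z => PySem.Set.issuperset cs z) := by
  have hle : ∀ e j, (pvPairs Z 0).count (e, j) ≤ 1 := fun e j => count_pvPairs_le_one Z hnd 0 e j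
  simp only [getD_pvIndex]
  rw [← PySem.Dict.counter_eq_foldl, PySem.Dict.items_counter]
  rw [Bool.eq_iff_iff]
  simp only [List.any_eq_true, List.mem_map]
  constructor
  · rintro ⟨p, ⟨j, hj, rfl⟩, hbeq⟩
    have hjhits : j ∈ cs.flatMap (fun e => (((pvPairs Z 0).filter (fun p => p.1 == e)).map (fun p => p.2))) :=
      (PySem.Set.mem_ofList _ _).mp hj
    -- j comes from some pair, so j = k for a valid index k
    obtain ⟨e, _, hjm⟩ := List.mem_flatMap.mp hjhits
    have hpair : (e, j) ∈ pvPairs Z 0 := (mem_filter_map_pairs _ _ _).mp hjm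
    obtain ⟨k, hk, hjk, _⟩ := (mem_pvPairs Z 0 e j).mp hpair
    rw [zero_add] at hjk
    subst hjk
    refine ⟨Z[k], List.getElem_mem hk, ?_⟩
    -- extract the counting equality from the beq
    rw [beq_iff_eq] at hbeq
    have hklen : k < (Z.map (fun fs => ((fs.length : Nat) : Int))).length := by
      simpa using hk
    rw [PySem.List.pyGet?_natCast, List.getElem?_eq_getElem hklen, List.getElem_map] at hbeq
    have hcnt : (cs.flatMap (fun e => (((pvPairs Z 0).filter (fun p => p.1 == e)).map (fun p => p.2)))).count ((k : Int)) = Z[k].length := by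
      have hb2 := Option.some.inj hbeq
      simp only [] at hb2
      exact_mod_cast hb2.symm
    rw [count_hits _ hle cs ((k : Int))] at hcnt
    -- (e, k) ∈ pairs ↔ e ∈ Z[k]
    have hiff : ∀ e' : String, ((e', (k : Int)) ∈ pvPairs Z 0) ↔ e' ∈ Z[k] := by
      intro e'
      rw [mem_pvPairs]
      constructor
      · rintro ⟨k', hk', hkk, hm⟩
        rw [zero_add] at hkk
        have : k' = k := by exact_mod_cast hkk.symm
        subst this
        exact hm
      · intro hm
        exact ⟨k, hk, by rw [zero_add], hm⟩
    have hcnt2 : cs.countP (fun e' => decide (e' ∈ Z[k])) = Z[k].length := by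
      rw [← hcnt]
      apply List.countP_congr
      intro e' _
      simp [hiff e']
    rw [PySem.Set.issuperset_iff]
    exact (countP_mem_eq_length_iff cs Z[k] hcs (hnd _ (List.getElem_mem hk))).mp hcnt2
  · rintro ⟨z, hz, hsup⟩
    obtain ⟨k, hk, rfl⟩ := List.mem_iff_getElem.mp hz
    rw [PySem.Set.issuperset_iff] at hsup
    -- Z[k] is nonempty: pick a shared element e
    obtain ⟨e, he⟩ := List.exists_mem_of_ne_nil _ (hne _ (List.getElem_mem hk))
    have hecs : e ∈ cs := hsup e he
    have hpair : (e, (k : Int)) ∈ pvPairs Z 0 :=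
      (mem_pvPairs Z 0 e (k : Int)).mpr ⟨k, hk, by rw [zero_add], he⟩
    have hjhits : (k : Int) ∈ cs.flatMap (fun e => (((pvPairs Z 0).filter (fun p => p.1 == e)).map (fun p => p.2))) :=
      List.mem_flatMap.mpr ⟨e, hecs, (mem_filter_map_pairs _ _ _).mpr hpair⟩
    have hiff : ∀ e' : String, ((e', (k : Int)) ∈ pvPairs Z 0) ↔ e' ∈ Z[k] := by
      intro e'
      rw [mem_pvPairs]
      constructor
      · rintro ⟨k', hk', hkk, hm⟩
        rw [zero_add] at hkk
        have : k' = k := by exact_mod_cast hkk.symm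
        subst this
        exact hm
      · intro hm
        exact ⟨k, hk, by rw [zero_add], hm⟩
    have hcnt2 : cs.countP (fun e' => decide (e' ∈ Z[k])) = Z[k].length :=
      (countP_mem_eq_length_iff cs Z[k] hcs (hnd _ (List.getElem_mem hk))).mpr hsup
    have hcnt : (cs.flatMap (fun e => (((pvPairs Z 0).filter (fun p => p.1 == e)).map (fun p => p.2)))).count ((k : Int)) = Z[k].length := by
      rw [count_hits _ hle cs ((k : Int))]
      rw [← hcnt2]
      apply List.countP_congr
      intro e' _
      simp [hiff e']
    refine ⟨((k : Int), ((cs.flatMap (fun e => (((pvPairs Z 0).filter (fun p => p.1 == e)).map (fun p => p.2)))).count ((k : Int)) : Nat)), ⟨(k : Int), (PySem.Set.mem_ofList _ _).mpr hjhits, rfl⟩, ?_⟩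
    rw [beq_iff_eq]
    have hklen : k < (Z.map (fun fs => ((fs.length : Nat) : Int))).length := by
      simpa using hk
    rw [PySem.List.pyGet?_natCast, List.getElem?_eq_getElem hklen, List.getElem_map]
    rw [hcnt]
  -- (end banned_eq)

-- dedup-by-set-equality does not change `any` for a predicate that respects set equality
lemma any_dedup (l : List (PySem.Set String)) (p : PySem.Set String → Bool)
    (hp : ∀ s t : PySem.Set String, PySem.Set.equal t s = true → p t = p s) :
    ∀ acc : List (PySem.Set String),
      (l.foldl (fun acc s => if acc.any (fun t => PySem.Set.equal t s) then acc else acc ++ [s]) acc).any p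
        = (acc.any p || l.any p) := by
  induction l with
  | nil => intro acc; simp
  | cons s l ih =>
    intro acc
    simp only [List.foldl_cons, List.any_cons]
    by_cases h : acc.any (fun t => PySem.Set.equal t s) = true
    · rw [if_pos h, ih acc]
      rcases List.any_eq_true.mp h with ⟨t, ht, heq⟩
      by_cases hps : p s = true
      · have : p t = true := (hp s t heq).trans hps
        have hacc : acc.any p = true := List.any_eq_true.mpr ⟨t, ht, this⟩
        simp [hacc, hps]
      · simp [Bool.eq_false_iff.mpr hps]
    · rw [if_neg h, ih (acc ++ [s])]
      simp [List.any_append, Bool.or_assoc]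

-- A's deduplicated zero-set list tests the same as the plain mapped list
lemma any_pvZSets (zero_combinations_set : List String) (S : PySem.Set String) :
    (pvZSets zero_combinations_set).any (fun z => PySem.Set.issuperset S z)
      = (zero_combinations_set.map (fun z => PySem.Set.ofList (pvSplit z))).any
          (fun z => PySem.Set.issuperset S z) := by
  have h1 : pvZSets zero_combinations_set
      = ((zero_combinations_set.map (fun z => PySem.Set.ofList (pvSplit z))).foldl
          (fun acc s => if acc.any (fun t => PySem.Set.equal t s) then acc else acc ++ [s]) []) := by
    simp [pvZSets, List.foldl_map]
  rw [h1]
  rw [any_dedup _ _ (fun s t heq => by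
      rw [Bool.eq_iff_iff, PySem.Set.issuperset_iff, PySem.Set.issuperset_iff]
      have := PySem.Set.equal_iff t s |>.mp heq
      constructor
      · intro h x hx; exact h x ((this x).mpr hx)
      · intro h x hx; exact h x ((this x).mp hx))]
  simp

-- ===== VERDICT (by name: the statement is the Claim_ definition above) =====
theorem filter_combination_list_spec : Claim_equal_filter_combination_list := by
  intro combination_list statistics zero_combinations_set trade_count_threshold _ _
  unfold Spec_filter_combination_list filter_combination_list filter_combination_list_alt
  apply PySem.List.foldl_congr_mem
  intro res combination _
  have hbanned :
      (((PySem.Set.ofList combination).flatMap (fun e => PySem.Dict.getD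
            (((PySem.List.enumerate (zero_combinations_set.map (fun z => PySem.Set.ofList (pvSplit z)))).flatMap
                (fun p => p.2.map (fun e => (e, p.1)))).foldl
              (fun d p => PySem.Dict.modify d p.1 [] (fun l => l ++ [p.2])) PySem.Dict.empty) e [])).foldl
          (fun d j => PySem.Dict.modify d j 0 (· + 1)) PySem.Dict.empty).items.any
          (fun p => PySem.List.pyGet?
            ((zero_combinations_set.map (fun z => PySem.Set.ofList (pvSplit z))).map
              (fun fs => ((fs.length : Nat) : Int))) p.1 == some p.2)
        = (pvZSets zero_combinations_set).any
            (fun z => PySem.Set.issuperset (PySem.Set.ofList combination) z) := by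
    rw [any_pvZSets]
    exact banned_eq (zero_combinations_set.map (fun z => PySem.Set.ofList (pvSplit z)))
      (by intro fs hfs
          obtain ⟨z, _, rfl⟩ := List.mem_map.mp hfs
          exact PySem.Set.nodup_ofList _)
      (by intro fs hfs
          obtain ⟨z, _, rfl⟩ := List.mem_map.mp hfs
          exact ofList_ne_nil (pvSplit_ne_nil z))
      (PySem.Set.ofList combination) (PySem.Set.nodup_ofList _)
  simp only [hbanned]
  cases hgd : PySem.Dict.get? (PySem.Dict.mk statistics) (PySem.Str.join ":" combination) with
  | none =>
    simp only [Bool.true_and, if_neg (by simp : ¬ (false = true))]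
    cases hb : (pvZSets zero_combinations_set).any
        (fun z => PySem.Set.issuperset (PySem.Set.ofList combination) z) <;> simp
  | some d =>
    by_cases hlt : PySem.Dict.getD (PySem.Dict.mk d) "trade_count" 0 < trade_count_threshold
    · simp [hlt, not_le.mpr hlt]
    · simp only [decide_eq_true (not_lt.mp hlt), Bool.true_and,
        if_neg (by simp [hlt] : ¬ (decide (PySem.Dict.getD (PySem.Dict.mk d) "trade_count" 0 < trade_count_threshold) = true))]
      cases hb : (pvZSets zero_combinations_set).any
          (fun z => PySem.Set.issuperset (PySem.Set.ofList combination) z) <;> simp
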